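-- pv_equiv track=rewrite | github.com/javaernesto/mpc-vote | comparison.py | CarryOutCin
-- ===== SOURCE A (Python) =====
-- def carry(p: tuple, g: tuple):
--     '''
--     Carry propagation (operator o):
--     return (r, s) = (p_2, g_2)o(p_1, g_1) = (p_1 & p_2, g_2 | (p_2 & g_1))
--     '''
--
--     if p is None:
--         return g
--     if g is None:
--         return p
--     r = g[0] & p[0]
--     s = (g[0] & p[1]) + g[1]
--     return r, s
--
-- def CarryOutAux(d: list, k: int):
--     '''
--     param d: ([d_k]_B, ..., [d_1]_B), where [a]_B = ([a_l], ..., [a_1])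
--     '''
--
--     u = []
--     if k > 1:
--         for i in range(k//2):
--             u_i = carry(d[2*i], d[2*i-1])
--             u.append(u_i)
--         return CarryOutAux(u[::-1], k//2)
--     else:
--         return d[0]
--
-- def CarryOutCin(a: list, b: list, c: int):
--     '''
--     param a: ([a_k], ..., [a_1])\\
--     param b: ([b_k], ..., [b_1])\\
--     param c: public carry-in bit
--     '''
--
--     assert len(a) == len(b)
--     k = len(a)
--     u = []
--     for i in range(k):
--         u_i = (a[i] + b[i] - 2*a[i]*b[i], a[i]*b[i])
--         u.append(u_i)
--
--     d = CarryOutAux(u[::-1], k)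
--     p, g = d
--
--     return g
-- ===== SOURCE B (Python) =====
-- def CarryOutCin(a: list, b: list, c: int):
--     assert len(a) == len(b)
--     k = len(a)
--     d = [(x + y - 2 * x * y, x * y) for x, y in zip(a, b)][::-1]
--     while k > 1:
--         d = [((d[2 * i - 1][0] & d[2 * i][0]),
--               (d[2 * i - 1][0] & d[2 * i][1]) + d[2 * i - 1][1])
--              for i in range(k // 2)][::-1]
--         k //= 2
--     return d[0][1]
-- ===== Notes on version B (the rewrite author's own statement) =====
-- stated objective: alternative
-- what changed: The recursive CarryOutAux tree reduction is replaced by an explicit iterative while-loop over levels, and the per-bit pair list is built by zipping a and b instead of an index loop; the carry operator is inlined. Same pairing/ordering (d[-1] wraparound and per-level reversal) and same values.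
import Mathlib
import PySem

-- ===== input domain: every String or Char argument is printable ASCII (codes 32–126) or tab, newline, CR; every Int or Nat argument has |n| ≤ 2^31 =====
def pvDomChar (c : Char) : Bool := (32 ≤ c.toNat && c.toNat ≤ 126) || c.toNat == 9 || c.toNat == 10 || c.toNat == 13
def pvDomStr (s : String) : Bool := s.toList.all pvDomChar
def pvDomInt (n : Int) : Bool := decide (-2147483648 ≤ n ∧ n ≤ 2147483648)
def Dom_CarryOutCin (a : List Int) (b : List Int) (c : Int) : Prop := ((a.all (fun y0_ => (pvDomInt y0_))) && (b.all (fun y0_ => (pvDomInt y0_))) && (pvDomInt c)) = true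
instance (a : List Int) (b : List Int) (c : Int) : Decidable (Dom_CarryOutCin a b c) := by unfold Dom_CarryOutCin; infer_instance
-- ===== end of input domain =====

-- B replaces A's recursive tree reduction by an iterative level loop with an inlined
-- carry operator and builds the initial pair list by zipping a and b (alternative, same cost).
-- ===== PORT A =====
-- carry(p, g): the 'p is None' / 'g is None' branches are never reached in this program
-- (every element passed is a pair), so the port takes pairs directly.
def pvCarry (p g : Int × Int) : Int × Int :=
  (PySem.Int.band g.1 p.1, PySem.Int.band g.1 p.2 + g.2)

def CarryOutAuxA (d : List (Int × Int)) (k : Int) : Int × Int :=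
  if h : 1 < k then
    let u := (PySem.List.pyRange 0 (PySem.Int.floordiv k 2) 1).foldl
      (fun u i => u ++ [pvCarry (PySem.List.pyGetD d (2 * i) (0, 0))
                                (PySem.List.pyGetD d (2 * i - 1) (0, 0))]) []
    CarryOutAuxA u.reverse (PySem.Int.floordiv k 2)
  else
    PySem.List.pyGetD d 0 (0, 0)
termination_by k.toNat
decreasing_by
  rw [PySem.Int.floordiv_eq_ediv_of_pos (by omega : (0:Int) < 2)]
  omega

def CarryOutCin (a : List Int) (b : List Int) (c : Int) : Int :=
  -- assert len(a) == len(b): the mismatch case raises and is excluded by Pre_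
  (CarryOutAuxA
    ((PySem.List.pyRange 0 (a.length : Int) 1).foldl
      (fun u i => u ++ [(PySem.List.pyGetD a i 0 + PySem.List.pyGetD b i 0
                          - 2 * PySem.List.pyGetD a i 0 * PySem.List.pyGetD b i 0,
                         PySem.List.pyGetD a i 0 * PySem.List.pyGetD b i 0)]) []).reverse
    (a.length : Int)).2

-- ===== PORT B =====
def pvLoop (d : List (Int × Int)) (k : Int) : List (Int × Int) :=
  if h : 1 < k then
    pvLoop (((PySem.List.pyRange 0 (PySem.Int.floordiv k 2) 1).map (fun i =>
        (PySem.Int.band (PySem.List.pyGetD d (2 * i - 1) (0, 0)).1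
                        (PySem.List.pyGetD d (2 * i) (0, 0)).1,
         PySem.Int.band (PySem.List.pyGetD d (2 * i - 1) (0, 0)).1
                        (PySem.List.pyGetD d (2 * i) (0, 0)).2
           + (PySem.List.pyGetD d (2 * i - 1) (0, 0)).2))).reverse)
      (PySem.Int.floordiv k 2)
  else d
termination_by k.toNat
decreasing_by
  rw [PySem.Int.floordiv_eq_ediv_of_pos (by omega : (0:Int) < 2)]
  omega

def CarryOutCin_alt (a : List Int) (b : List Int) (c : Int) : Int :=
  (PySem.List.pyGetD
    (pvLoop (((a.zip b).map (fun xy => (xy.1 + xy.2 - 2 * xy.1 * xy.2, xy.1 * xy.2))).reverse)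
      (a.length : Int))
    0 (0, 0)).2

-- ===== PRECONDITION & SPEC =====
-- Pre_ excludes lists of different lengths (the assert raises AssertionError) and the
-- empty list (d[0] raises IndexError); A raises on exactly these inputs.
def Pre_CarryOutCin (a : List Int) (b : List Int) (c : Int) : Prop :=
  a.length = b.length ∧ a ≠ []
instance (a : List Int) (b : List Int) (c : Int) : Decidable (Pre_CarryOutCin a b c) := by
  unfold Pre_CarryOutCin; infer_instance

def pvWitness_CarryOutCin : List Int × List Int × Int := ([1, 0, 1], [1, 1, 0], 0)

def Spec_CarryOutCin (a : List Int) (b : List Int) (c : Int) (out : Int) : Prop := out = CarryOutCin_alt a b c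
instance (a : List Int) (b : List Int) (c : Int) (out : Int) : Decidable (Spec_CarryOutCin a b c out) := by unfold Spec_CarryOutCin; infer_instance

-- ===== CLAIM (what is proved, stated in full; the proofs are below) =====
def Claim_equal_CarryOutCin : Prop := ∀ (a : List Int) (b : List Int) (c : Int), Dom_CarryOutCin a b c → Pre_CarryOutCin a b c → Spec_CarryOutCin a b c (CarryOutCin a b c)

-- ===== LEMMAS AND PROOFS =====

-- Each level of A's recursion builds, via append-fold, the same list B's comprehension maps.
theorem pv_step_eq (d : List (Int × Int)) (k : Int) :
    (PySem.List.pyRange 0 (PySem.Int.floordiv k 2) 1).foldl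
      (fun u i => u ++ [pvCarry (PySem.List.pyGetD d (2 * i) (0, 0))
                                (PySem.List.pyGetD d (2 * i - 1) (0, 0))]) []
    = (PySem.List.pyRange 0 (PySem.Int.floordiv k 2) 1).map (fun i =>
        (PySem.Int.band (PySem.List.pyGetD d (2 * i - 1) (0, 0)).1
                        (PySem.List.pyGetD d (2 * i) (0, 0)).1,
         PySem.Int.band (PySem.List.pyGetD d (2 * i - 1) (0, 0)).1
                        (PySem.List.pyGetD d (2 * i) (0, 0)).2
           + (PySem.List.pyGetD d (2 * i - 1) (0, 0)).2)) := by
  rw [PySem.List.foldl_append_singleton_eq_map]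
  rfl

-- A's recursive reducer returns the head of the list B's iterative loop ends with.
theorem pv_aux_eq_loop (d : List (Int × Int)) (k : Int) :
    CarryOutAuxA d k = PySem.List.pyGetD (pvLoop d k) 0 (0, 0) := by
  unfold CarryOutAuxA pvLoop
  split
  · rw [pv_step_eq]
    exact pv_aux_eq_loop _ _
  · rfl
termination_by k.toNat
decreasing_by
  rw [PySem.Int.floordiv_eq_ediv_of_pos (by omega : (0:Int) < 2)]
  omega

-- The index-loop pair construction equals the zip construction (equal lengths).
theorem pv_init_eq (F : Int → Int → Int × Int) :
    ∀ (a b : List Int), a.length = b.length →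
    (List.range a.length).map (fun i => F (a.getD i 0) (b.getD i 0))
      = (a.zip b).map (fun xy => F xy.1 xy.2)
  | [], [], _ => rfl
  | x :: a, y :: b, h => by
    simp only [List.length_cons, List.range_succ_eq_map, List.map_cons, List.map_map,
      List.zip_cons_cons]
    refine congrArg₂ _ rfl ?_
    have := pv_init_eq F a b (by simpa using h)
    simpa [Function.comp] using this

-- ===== VERDICT (by name: the statement is the Claim_ definition above) =====
theorem CarryOutCin_spec : Claim_equal_CarryOutCin := by
  intro a b c _ hpre
  obtain ⟨hlen, _⟩ := hpre
  unfold Spec_CarryOutCin CarryOutCin CarryOutCin_alt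
  rw [pv_aux_eq_loop]
  have hinit :
      (PySem.List.pyRange 0 (a.length : Int) 1).foldl
        (fun u i => u ++ [(PySem.List.pyGetD a i 0 + PySem.List.pyGetD b i 0
                            - 2 * PySem.List.pyGetD a i 0 * PySem.List.pyGetD b i 0,
                           PySem.List.pyGetD a i 0 * PySem.List.pyGetD b i 0)]) []
      = (a.zip b).map (fun xy => (xy.1 + xy.2 - 2 * xy.1 * xy.2, xy.1 * xy.2)) := by
    rw [PySem.List.foldl_append_singleton_eq_map, PySem.List.pyRange_one]
    simp only [sub_zero, Int.toNat_natCast, List.map_map, zero_add]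
    have := pv_init_eq (fun x y => (x + y - 2 * x * y, x * y)) a b hlen
    rw [← this]
    refine List.map_congr_left ?_
    intro i hi
    simp [Function.comp, PySem.List.pyGetD_natCast]
  simp only [hinit]
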